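-- pv_equiv track=rewrite | github.com/Amanuel94/CF-Solutions | C_Tree_Cutting.py | dfs
-- ===== SOURCE A (Python) =====
-- def dfs(node, graph, vis, k, x):
--     vis.add(node)
--     des = 0
--     deleted = 0
--     for nbr in graph[node]:
--         if nbr not in vis:
--             below, prev = dfs(nbr, graph, vis, k, x)
--             deleted += prev
--             if below >= x:
--                 deleted += 1
--                 des -= below
--             des += below
--
--     des += 1
--     return des, deleted
-- ===== SOURCE B (Python) =====
-- # Iterative explicit-stack post-order traversal replacing A's recursion; return value
-- # identical to A's; like A, it adds the visited nodes to the caller's `vis` set.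
-- def dfs(node, graph, vis, k, x):
--     vis.add(node)
--     stack = [(node, list(graph[node]), 0, 0)]
--     while stack:
--         n, nbrs, des, deleted = stack.pop()
--         if not nbrs:
--             below = des + 1
--             if not stack:
--                 return below, deleted
--             pn, pnbrs, pdes, pdel = stack.pop()
--             pdel += deleted
--             if below >= x:
--                 pdel += 1
--             else:
--                 pdes += below
--             stack.append((pn, pnbrs, pdes, pdel))
--         else:
--             nbr, rest = nbrs[0], nbrs[1:]
--             if nbr in vis:
--                 stack.append((n, rest, des, deleted))
--             else:
--                 vis.add(nbr)
--                 stack.append((n, rest, des, deleted))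
--                 stack.append((nbr, list(graph[nbr]), 0, 0))
-- ===== Notes on version B (the rewrite author's own statement) =====
-- stated objective: alternative
-- what changed: A's recursive DFS is replaced by an iterative post-order traversal over an explicit stack of (node, remaining-neighbours, des, deleted) frames that folds each finished child into its parent frame, removing recursion (and Python's recursion-depth limit on deep trees).
import Mathlib
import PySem

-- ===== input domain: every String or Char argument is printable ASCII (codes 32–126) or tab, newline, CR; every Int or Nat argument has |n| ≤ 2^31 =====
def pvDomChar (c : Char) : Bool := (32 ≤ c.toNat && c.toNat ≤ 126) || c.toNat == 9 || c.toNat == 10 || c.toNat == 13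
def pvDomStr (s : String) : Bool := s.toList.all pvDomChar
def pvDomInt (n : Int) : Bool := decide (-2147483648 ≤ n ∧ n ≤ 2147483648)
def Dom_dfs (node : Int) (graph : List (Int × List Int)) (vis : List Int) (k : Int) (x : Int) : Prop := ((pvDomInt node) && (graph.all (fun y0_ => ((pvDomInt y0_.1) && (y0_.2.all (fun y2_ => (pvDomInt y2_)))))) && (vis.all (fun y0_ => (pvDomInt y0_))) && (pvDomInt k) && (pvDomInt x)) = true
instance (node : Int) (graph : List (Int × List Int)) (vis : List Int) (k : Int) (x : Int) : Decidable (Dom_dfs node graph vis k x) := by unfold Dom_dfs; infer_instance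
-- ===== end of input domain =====

-- B replaces A's recursion by an explicit-stack iterative post-order machine (alternative
-- decomposition, same cost); both Pythons mutate `vis` identically — the theorems are about
-- the returned pair only.

-- ===== PORT A =====
-- graph[n] (the lookup itself; raising inputs are excluded by Pre_dfs, the port totalizes with [])
def pvGraphGet (graph : List (Int × List Int)) (n : Int) : List Int :=
  PySem.Dict.getD (PySem.Dict.mk graph) n []

-- all node names occurring in graph (keys and listed neighbours); its length bounds the
-- recursion depth, so it serves as the fuel that makes the port total
def pvU (graph : List (Int × List Int)) : List Int :=
  graph.foldr (fun p acc => p.1 :: p.2 ++ acc) []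

mutual
-- A's recursive dfs; `none` is unreachable fuel exhaustion (proved below)
def dfsAux (graph : List (Int × List Int)) (x : Int) :
    Nat → Int → List Int → Option (List Int × Int × Int)
  | 0, _, _ => none
  | f+1, node, vis =>
    match loopA graph x f (pvGraphGet graph node) (PySem.Set.add vis node) 0 0 with
    | none => none
    | some (vis1, des, del) => some (vis1, des + 1, del)
  termination_by f _ _ => ((f, 0, 0) : Nat ×ₗ Nat ×ₗ Nat)

-- A's `for nbr in graph[node]` loop, carrying (vis, des, deleted)
def loopA (graph : List (Int × List Int)) (x : Int) :
    Nat → List Int → List Int → Int → Int → Option (List Int × Int × Int)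
  | _, [], vis, des, del => some (vis, des, del)
  | f, nbr :: rest, vis, des, del =>
    if PySem.Set.contains vis nbr then loopA graph x f rest vis des del
    else
      match dfsAux graph x f nbr vis with
      | none => none
      | some (vis1, below, prev) =>
        let del1 := del + prev
        if below ≥ x then loopA graph x f rest vis1 (des - below + below) (del1 + 1)
        else loopA graph x f rest vis1 (des + below) del1
  termination_by f l _ _ _ => ((f, 1, l.length) : Nat ×ₗ Nat ×ₗ Nat)
end

def dfs (node : Int) (graph : List (Int × List Int)) (vis : List Int) (k : Int) (x : Int) : Int × Int :=
  match dfsAux graph x ((pvU graph).length + 1) node vis with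
  | some r => (r.2.1, r.2.2)
  | none => (0, 0)

-- ===== PORT B =====
-- B's while-loop over the explicit frame stack (node, remaining nbrs, des, deleted);
-- `none` is unreachable fuel exhaustion (and the unreachable empty-stack exit)
def runB (graph : List (Int × List Int)) (x : Int) :
    Nat → List (Int × List Int × Int × Int) → List Int → Option (List Int × Int × Int)
  | 0, _, _ => none
  | _+1, [], _ => none
  | f+1, (n, nbrs, des, del) :: rest, vis =>
    match nbrs with
    | [] =>
      let below := des + 1
      match rest with
      | [] => some (vis, below, del)
      | (pn, pnbrs, pdes, pdel) :: rest' =>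
        let pdel1 := pdel + del
        if below ≥ x then runB graph x f ((pn, pnbrs, pdes, pdel1 + 1) :: rest') vis
        else runB graph x f ((pn, pnbrs, pdes + below, pdel1) :: rest') vis
    | nbr :: nrest =>
      if PySem.Set.contains vis nbr then runB graph x f ((n, nrest, des, del) :: rest) vis
      else runB graph x f ((nbr, pvGraphGet graph nbr, 0, 0) :: (n, nrest, des, del) :: rest)
             (PySem.Set.add vis nbr)

def pvFuelB (graph : List (Int × List Int)) : Nat :=
  (2 * (pvU graph).length + 2) ^ ((pvU graph).length + 3)

def dfs_alt (node : Int) (graph : List (Int × List Int)) (vis : List Int) (k : Int) (x : Int) : Int × Int :=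
  match runB graph x (pvFuelB graph) [(node, pvGraphGet graph node, 0, 0)] (PySem.Set.add vis node) with
  | some r => (r.2.1, r.2.2)
  | none => (0, 0)

-- ===== PRECONDITION & SPEC =====
-- Pre_dfs excludes exactly the inputs on which Python A raises KeyError: it requires every
-- node in the closure reachable from `node` through not-yet-visited nodes (the nodes whose
-- adjacency A looks up) to be a key of graph.
-- one saturation pass: add every unvisited neighbour of the current node set
def pvStep (graph : List (Int × List Int)) (vis : List Int) (S : List Int) : List Int :=
  S.foldl (fun acc u => (pvGraphGet graph u).foldl
    (fun acc2 m => if m ∈ vis then acc2 else PySem.Set.add acc2 m) acc) S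

-- the nodes A looks up: saturate from {node}; (pvU graph).length + 1 passes reach the fixpoint
def pvReach (graph : List (Int × List Int)) (vis : List Int) (node : Int) : List Int :=
  (pvStep graph vis)^[(pvU graph).length + 1] [node]

def Pre_dfs (node : Int) (graph : List (Int × List Int)) (vis : List Int) (k : Int) (x : Int) : Prop :=
  ∀ m ∈ pvReach graph vis node, ((PySem.Dict.mk graph).get? m).isSome = true
instance (node : Int) (graph : List (Int × List Int)) (vis : List Int) (k : Int) (x : Int) : Decidable (Pre_dfs node graph vis k x) := by unfold Pre_dfs; infer_instance

def pvWitness_dfs : Int × (List (Int × List Int)) × List Int × Int × Int :=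
  (0, [(0, [1, 2]), (1, [2]), (2, [])], [], 5, 2)

def Spec_dfs (node : Int) (graph : List (Int × List Int)) (vis : List Int) (k : Int) (x : Int) (out : Int × Int) : Prop := out = dfs_alt node graph vis k x
instance (node : Int) (graph : List (Int × List Int)) (vis : List Int) (k : Int) (x : Int) (out : Int × Int) : Decidable (Spec_dfs node graph vis k x out) := by unfold Spec_dfs; infer_instance

-- ===== CLAIM (what is proved, stated in full; the proofs are below) =====
def Claim_equal_dfs : Prop := ∀ (node : Int) (graph : List (Int × List Int)) (vis : List Int) (k : Int) (x : Int), Dom_dfs node graph vis k x → Pre_dfs node graph vis k x → Spec_dfs node graph vis k x (dfs node graph vis k x)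

-- ===== LEMMAS AND PROOFS =====

-- the number of graph-mentioned nodes not yet visited: the real bound on recursion depth
def pvUnvis (graph : List (Int × List Int)) (vis : List Int) : Nat :=
  ((pvU graph).filter (fun m => !vis.contains m)).length

-- per-call machine-fuel budget for simulating one A-call made at A-fuel f
def pvCst (graph : List (Int × List Int)) (f : Nat) : Nat :=
  (2 * (pvU graph).length + 2) ^ (f + 1)

theorem pvFilterLenMono (p q : Int → Bool) (l : List Int) (h : ∀ a ∈ l, p a = true → q a = true) :
    (l.filter p).length ≤ (l.filter q).length := by
  rw [← List.countP_eq_length_filter, ← List.countP_eq_length_filter]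
  exact List.countP_mono_left h

theorem pvGraphGet_subset (graph : List (Int × List Int)) (n : Int) :
    pvGraphGet graph n ⊆ pvU graph := by
  induction graph with
  | nil => simp [pvGraphGet, PySem.Dict.getD, PySem.Dict.get?, pvU]
  | cons a g ih =>
    simp only [pvGraphGet, PySem.Dict.getD, PySem.Dict.get?, pvU, List.foldr] at ih ⊢
    rw [List.find?_cons]
    cases h : (a.1 == n) with
    | true =>
      simp only [Option.map_some, Option.getD_some]
      intro y hy
      exact List.mem_cons_of_mem _ (List.mem_append_left _ hy)
    | false =>
      simp only []
      intro y hy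
      exact List.mem_cons_of_mem _ (List.mem_append_right _ (ih hy))

theorem pvGraphGet_length_le (graph : List (Int × List Int)) (n : Int) :
    (pvGraphGet graph n).length ≤ (pvU graph).length := by
  induction graph with
  | nil => simp [pvGraphGet, PySem.Dict.getD, PySem.Dict.get?, pvU]
  | cons a g ih =>
    simp only [pvGraphGet, PySem.Dict.getD, PySem.Dict.get?, pvU, List.foldr] at ih ⊢
    rw [List.find?_cons]
    cases h : (a.1 == n) with
    | true =>
      simp only [Option.map_some, Option.getD_some, List.length_cons,
        List.length_append]
      omega
    | false =>
      simp only [List.length_cons, List.length_append]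
      omega

theorem subset_set_add (vis : List Int) (m : Int) : vis ⊆ PySem.Set.add vis m := by
  rw [PySem.Set.add_eq_ite]
  split
  · exact fun _ h => h
  · exact List.subset_append_left _ _

theorem mem_set_add_self (vis : List Int) (m : Int) : m ∈ PySem.Set.add vis m := by
  rw [PySem.Set.add_eq_ite]
  split
  · assumption
  · simp

theorem not_mem_of_contains_false {vis : List Int} {m : Int}
    (h : PySem.Set.contains vis m = false) : m ∉ vis := by
  simpa [PySem.Set.contains] using h

theorem pvUnvis_mono (graph : List (Int × List Int)) {vis vis' : List Int}
    (h : vis ⊆ vis') : pvUnvis graph vis' ≤ pvUnvis graph vis := by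
  refine pvFilterLenMono _ _ _ ?_
  intro a _ ha
  simp only [Bool.not_eq_eq_eq_not, Bool.not_true, List.contains_eq_mem,
    decide_eq_false_iff_not] at ha ⊢
  exact fun hm => ha (h hm)

theorem pvUnvis_add_lt (graph : List (Int × List Int)) {vis : List Int} {m : Int}
    (hU : m ∈ pvU graph) (hm : m ∉ vis) :
    pvUnvis graph (PySem.Set.add vis m) < pvUnvis graph vis := by
  unfold pvUnvis
  obtain ⟨s, t, he⟩ := List.append_of_mem hU
  rw [he]
  simp only [List.filter_append, List.filter_cons, List.length_append]
  have h1 : (!List.contains (PySem.Set.add vis m) m) = false := by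
    simp [List.contains_eq_mem, mem_set_add_self vis m]
  have h2 : (!List.contains vis m) = true := by
    simp [List.contains_eq_mem, hm]
  rw [h1, h2]
  simp only [Bool.false_eq_true, if_false, if_true, List.length_cons]
  have hmono : ∀ l : List Int,
      (l.filter (fun y => !List.contains (PySem.Set.add vis m) y)).length ≤
      (l.filter (fun y => !List.contains vis y)).length := by
    intro l
    refine pvFilterLenMono _ _ _ ?_
    intro a _ ha
    simp only [Bool.not_eq_eq_eq_not, Bool.not_true, List.contains_eq_mem,
      decide_eq_false_iff_not] at ha ⊢
    exact fun hmem => ha (subset_set_add vis m hmem)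
  have := hmono s
  have := hmono t
  omega

theorem pvUnvis_le_len (graph : List (Int × List Int)) (vis : List Int) :
    pvUnvis graph vis ≤ (pvU graph).length :=
  List.length_filter_le _ _

-- visited set only grows through the A-side loop / calls
theorem grow_all (graph : List (Int × List Int)) (x : Int) :
    ∀ f, (∀ n vis out, dfsAux graph x f n vis = some out → vis ⊆ out.1) ∧
         (∀ l vis des del out, loopA graph x f l vis des del = some out → vis ⊆ out.1) := by
  intro f
  induction f using Nat.strong_induction_on with
  | _ f ihf =>
    have hQ : ∀ n vis out, dfsAux graph x f n vis = some out → vis ⊆ out.1 := by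
      match f with
      | 0 => intro n vis out h; simp [dfsAux] at h
      | g+1 =>
        intro n vis out h
        simp only [dfsAux] at h
        cases hl : loopA graph x g (pvGraphGet graph n) (PySem.Set.add vis n) 0 0 with
        | none => rw [hl] at h; simp at h
        | some t =>
          rw [hl] at h
          obtain ⟨v1, d, dl⟩ := t
          simp only [Option.some.injEq] at h
          have := (ihf g (by omega)).2 _ _ _ _ _ hl
          subst h
          exact fun a ha => this (subset_set_add vis n ha)
    refine ⟨hQ, ?_⟩
    intro l
    induction l with
    | nil =>
      intro vis des del out h
      simp only [loopA, Option.some.injEq] at h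
      subst h; exact fun a ha => ha
    | cons nbr rest ihl =>
      intro vis des del out h
      simp only [loopA] at h
      by_cases hc : PySem.Set.contains vis nbr = true
      · rw [if_pos hc] at h
        exact ihl _ _ _ _ h
      · rw [if_neg hc] at h
        cases hd : dfsAux graph x f nbr vis with
        | none => rw [hd] at h; simp at h
        | some t =>
          rw [hd] at h
          obtain ⟨v1, below, prev⟩ := t
          have hsub : vis ⊆ v1 := hQ _ _ _ hd
          simp only at h
          by_cases hx : below ≥ x
          · rw [if_pos hx] at h
            exact fun a ha => ihl _ _ _ _ h (hsub ha)
          · rw [if_neg hx] at h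
            exact fun a ha => ihl _ _ _ _ h (hsub ha)

-- fuel sufficiency for the A port
theorem total_all (graph : List (Int × List Int)) (x : Int) :
    ∀ f, (∀ n vis, pvUnvis graph (PySem.Set.add vis n) < f →
            (dfsAux graph x f n vis).isSome) ∧
         (∀ l vis des del, l ⊆ pvU graph → pvUnvis graph vis ≤ f →
            (loopA graph x f l vis des del).isSome) := by
  intro f
  induction f using Nat.strong_induction_on with
  | _ f ihf =>
    have hQ : ∀ n vis, pvUnvis graph (PySem.Set.add vis n) < f →
        (dfsAux graph x f n vis).isSome := by
      match f with
      | 0 => intro n vis h; exact absurd h (Nat.not_lt_zero _)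
      | g+1 =>
        intro n vis h
        have hsome := (ihf g (by omega)).2 (pvGraphGet graph n) (PySem.Set.add vis n) 0 0
          (pvGraphGet_subset graph n) (by omega)
        simp only [dfsAux]
        cases hl : loopA graph x g (pvGraphGet graph n) (PySem.Set.add vis n) 0 0 with
        | none => rw [hl] at hsome; simp at hsome
        | some t => obtain ⟨v1, d, dl⟩ := t; simp
    refine ⟨hQ, ?_⟩
    intro l
    induction l with
    | nil => intro vis des del _ _; simp [loopA]
    | cons nbr rest ihl =>
      intro vis des del hsub hle
      simp only [loopA]
      by_cases hc : PySem.Set.contains vis nbr = true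
      · rw [if_pos hc]
        exact ihl vis des del (fun a ha => hsub (List.mem_cons_of_mem _ ha)) hle
      · rw [if_neg hc]
        have hnm : nbr ∉ vis := not_mem_of_contains_false (by simpa using hc)
        have hnU : nbr ∈ pvU graph := hsub List.mem_cons_self
        have hlt : pvUnvis graph (PySem.Set.add vis nbr) < f :=
          lt_of_lt_of_le (pvUnvis_add_lt graph hnU hnm) hle
        have hsome := hQ nbr vis hlt
        cases hd : dfsAux graph x f nbr vis with
        | none => rw [hd] at hsome; simp at hsome
        | some t =>
          obtain ⟨v1, below, prev⟩ := t
          have hv1 : vis ⊆ v1 := (grow_all graph x f).1 _ _ _ hd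
          have hle1 : pvUnvis graph v1 ≤ f := le_trans (pvUnvis_mono graph hv1) hle
          have hrest : rest ⊆ pvU graph := fun a ha => hsub (List.mem_cons_of_mem _ ha)
          simp only
          by_cases hx : below ≥ x
          · rw [if_pos hx]
            exact ihl v1 _ _ hrest hle1
          · rw [if_neg hx]
            exact ihl v1 _ _ hrest hle1


-- B's machine is fuel-monotone
theorem runB_mono (graph : List (Int × List Int)) (x : Int) :
    ∀ f g s vis r, f ≤ g → runB graph x f s vis = some r → runB graph x g s vis = some r := by
  intro f
  induction f with
  | zero => intro g s vis r _ h; simp [runB] at h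
  | succ f ihf =>
    intro g s vis r hle h
    match g, hle with
    | g+1, hle =>
      have hfg : f ≤ g := by omega
      match s with
      | [] => simp [runB] at h
      | (n, nbrs, des, del) :: rest =>
        match nbrs with
        | [] =>
          match rest with
          | [] => simpa [runB] using h
          | (pn, pnbrs, pdes, pdel) :: rest' =>
            simp only [runB] at h ⊢
            by_cases hx : des + 1 ≥ x
            · rw [if_pos hx] at h ⊢; exact ihf g _ _ _ hfg h
            · rw [if_neg hx] at h ⊢; exact ihf g _ _ _ hfg h
        | nbr :: nrest =>
          simp only [runB] at h ⊢
          by_cases hc : PySem.Set.contains vis nbr = true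
          · rw [if_pos hc] at h ⊢; exact ihf g _ _ _ hfg h
          · rw [if_neg hc] at h ⊢; exact ihf g _ _ _ hfg h

-- enough budget at fuel fc+1 for one child simulation (push + child's loop + pop)
theorem pvCst_step (graph : List (Int × List Int)) (fc : Nat) {D : Nat}
    (hD : D ≤ (pvU graph).length) :
    D * (pvCst graph fc + 1) + 2 ≤ pvCst graph (fc + 1) + 1 := by
  unfold pvCst
  have hC : 1 ≤ (2 * (pvU graph).length + 2) ^ (fc + 1) := Nat.one_le_pow _ _ (by omega)
  have hps : (2 * (pvU graph).length + 2) ^ (fc + 1 + 1)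
      = (2 * (pvU graph).length + 2) ^ (fc + 1) * (2 * (pvU graph).length + 2) :=
    pow_succ _ _
  nlinarith [hps, hC,
    mul_le_mul_of_nonneg_right hD (Nat.zero_le ((2 * (pvU graph).length + 2) ^ fc + 1))]

-- the simulation: started on a frame holding A's loop state, B's machine reaches the
-- frame-completed state A's loop computes, and from there behaves as assumed
theorem sim (graph : List (Int × List Int)) (x : Int) :
    ∀ f nbrs n des del vis out rest g r,
      loopA graph x f nbrs vis des del = some out →
      runB graph x g ((n, ([] : List Int), out.2.1, out.2.2) :: rest) out.1 = some r →
      runB graph x (g + nbrs.length * (pvCst graph f + 1)) ((n, nbrs, des, del) :: rest) vis = some r := by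
  intro f
  induction f using Nat.strong_induction_on with
  | _ f ihf =>
    intro nbrs
    induction nbrs with
    | nil =>
      intro n des del vis out rest g r hl hr
      simp only [loopA, Option.some.injEq] at hl
      subst hl
      simpa using hr
    | cons nbr rest' ihl =>
      intro n des del vis out rest g r hl hr
      simp only [loopA] at hl
      by_cases hc : PySem.Set.contains vis nbr = true
      · rw [if_pos hc] at hl
        have hstep := ihl n des del vis out rest g r hl hr
        have hone : 1 ≤ (rest'.length + 1) * (pvCst graph f + 1) :=
          Nat.mul_pos (by omega) (by omega)
        have hexp : (rest'.length + 1) * (pvCst graph f + 1)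
            = rest'.length * (pvCst graph f + 1) + (pvCst graph f + 1) := by ring
        have heq : g + (nbr :: rest').length * (pvCst graph f + 1)
            = (g + rest'.length * (pvCst graph f + 1) + pvCst graph f) + 1 := by
          simp only [List.length_cons]; omega
        rw [heq]
        simp only [runB, if_pos hc]
        exact runB_mono graph x _ _ _ _ _ (by omega) hstep
      · rw [if_neg hc] at hl
        cases hd : dfsAux graph x f nbr vis with
        | none => rw [hd] at hl; simp at hl
        | some t =>
          rw [hd] at hl
          obtain ⟨v1, below, prev⟩ := t
          dsimp only at hl
          cases f with
          | zero => simp [dfsAux] at hd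
          | succ fc =>
            simp only [dfsAux] at hd
            cases hli : loopA graph x fc (pvGraphGet graph nbr) (PySem.Set.add vis nbr) 0 0 with
            | none => rw [hli] at hd; simp at hd
            | some u =>
              rw [hli] at hd
              obtain ⟨v1', d, prev'⟩ := u
              simp only [Option.some.injEq, Prod.mk.injEq] at hd
              obtain ⟨hv1, hbelow, hprev⟩ := hd
              subst hv1; subst hbelow; subst hprev
              have hcst := pvCst_step graph fc (pvGraphGet_length_le graph nbr)
              have hone : 1 ≤ (rest'.length + 1) * (pvCst graph (fc + 1) + 1) :=
                Nat.mul_pos (by omega) (by omega)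
              have hexp : (rest'.length + 1) * (pvCst graph (fc + 1) + 1)
                  = rest'.length * (pvCst graph (fc + 1) + 1) + (pvCst graph (fc + 1) + 1) := by
                ring
              -- the continuation of A's loop and the matching machine run
              by_cases hx : d + 1 ≥ x
              · rw [if_pos hx] at hl
                have hdes : des - (d + 1) + (d + 1) = des := by ring
                rw [hdes] at hl
                have h1 := ihl n des (del + prev' + 1) v1' out rest g r hl hr
                -- pop step
                have hpop : runB graph x (g + rest'.length * (pvCst graph (fc + 1) + 1) + 1)
                    ((nbr, ([] : List Int), d, prev') :: (n, rest', des, del) :: rest) v1'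
                    = some r := by
                  simp only [runB, if_pos hx]
                  exact h1
                -- child simulation (outer IH at fc)
                have h2 := ihf fc (by omega) (pvGraphGet graph nbr) nbr 0 0
                  (PySem.Set.add vis nbr) (v1', d, prev') ((n, rest', des, del) :: rest)
                  (g + rest'.length * (pvCst graph (fc + 1) + 1) + 1) r hli hpop
                -- push step and fuel accounting
                have hK : g + (nbr :: rest').length * (pvCst graph (fc + 1) + 1)
                    = (g + (rest'.length + 1) * (pvCst graph (fc + 1) + 1) - 1) + 1 := by
                  simp only [List.length_cons]; omega
                rw [hK]
                simp only [runB, if_neg hc]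
                refine runB_mono graph x _ _ _ _ _ (by omega) h2
              · rw [if_neg hx] at hl
                have h1 := ihl n (des + (d + 1)) (del + prev') v1' out rest g r hl hr
                have hpop : runB graph x (g + rest'.length * (pvCst graph (fc + 1) + 1) + 1)
                    ((nbr, ([] : List Int), d, prev') :: (n, rest', des, del) :: rest) v1'
                    = some r := by
                  simp only [runB, if_neg hx]
                  exact h1
                have h2 := ihf fc (by omega) (pvGraphGet graph nbr) nbr 0 0
                  (PySem.Set.add vis nbr) (v1', d, prev') ((n, rest', des, del) :: rest)
                  (g + rest'.length * (pvCst graph (fc + 1) + 1) + 1) r hli hpop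
                have hK : g + (nbr :: rest').length * (pvCst graph (fc + 1) + 1)
                    = (g + (rest'.length + 1) * (pvCst graph (fc + 1) + 1) - 1) + 1 := by
                  simp only [List.length_cons]; omega
                rw [hK]
                simp only [runB, if_neg hc]
                refine runB_mono graph x _ _ _ _ _ (by omega) h2

-- ===== VERDICT (by name: the statement is the Claim_ definition above) =====
theorem dfs_spec : Claim_equal_dfs := by
  intro node graph vis k x _ _
  unfold Spec_dfs
  have htot := (total_all graph x ((pvU graph).length + 1)).1 node vis
    (by have := pvUnvis_le_len graph (PySem.Set.add vis node); omega)
  cases hA : dfsAux graph x ((pvU graph).length + 1) node vis with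
  | none => rw [hA] at htot; simp at htot
  | some out =>
    have hA' := hA
    simp only [dfsAux] at hA'
    cases hl : loopA graph x (pvU graph).length (pvGraphGet graph node) (PySem.Set.add vis node) 0 0 with
    | none => rw [hl] at hA'; simp at hA'
    | some u =>
      rw [hl] at hA'
      obtain ⟨v1, d, dl⟩ := u
      simp only [Option.some.injEq] at hA'
      have hbase : runB graph x 1 ((node, ([] : List Int), d, dl) :: []) v1
          = some (v1, d + 1, dl) := by
        simp [runB]
      have hsim := sim graph x (pvU graph).length (pvGraphGet graph node) node 0 0
        (PySem.Set.add vis node) (v1, d, dl) [] 1 (v1, d + 1, dl) hl hbase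
      have hrun : runB graph x (pvFuelB graph)
          [(node, pvGraphGet graph node, 0, 0)] (PySem.Set.add vis node)
          = some (v1, d + 1, dl) := by
        refine runB_mono graph x _ _ _ _ _ ?_ hsim
        -- 1 + D*(C+1) ≤ (2S+2)^(S+3)
        have hD := pvGraphGet_length_le graph node
        set S := (pvU graph).length with hS
        set C := pvCst graph S with hC
        have hC1 : 1 ≤ C := Nat.one_le_pow _ _ (by omega)
        have h1 : 1 + (pvGraphGet graph node).length * (C + 1) ≤ (2 * S + 2) * C := by
          nlinarith [mul_le_mul_of_nonneg_right hD (Nat.zero_le C)]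
        have h2 : pvFuelB graph = C * (2 * S + 2) * (2 * S + 2) := by
          simp only [pvFuelB, hC, pvCst, ← hS]
          rw [show S + 3 = (S + 1) + 1 + 1 by omega, pow_succ, pow_succ]
        have h3 : (2 * S + 2) * C ≤ C * (2 * S + 2) * (2 * S + 2) := by
          nlinarith [hC1]
        omega
      rw [dfs, dfs_alt, hA, hrun, ← hA']
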